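-- pv_equiv track=rewrite | github.com/ofsouzap/QuineMcCluskyMethod | QuineMcCluskyMethod.py | implicant_to_minterm
-- ===== SOURCE A (Python) =====
-- from typing import Tuple, List, Union, Optional;
--
-- Minterm = List[bool];
--
-- Implicant = List[Optional[bool]];
--
-- def implicant_to_minterm(implicant: Implicant) -> Minterm:
--
--     out: Minterm = [];
--
--     for v in implicant:
--         if v == None:
--             raise Exception("Can't convert Implicant with None value to Minterm.");
--         else:
--             out.append(v);
--
--     return out;
-- ===== SOURCE B (Python) =====
-- def implicant_to_minterm(implicant):
--     if not implicant:
--         return []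
--     if implicant[0] == None:
--         raise Exception("Can't convert Implicant with None value to Minterm.")
--     return [implicant[0]] + implicant_to_minterm(implicant[1:])
-- ===== Notes on version B (the rewrite author's own statement) =====
-- stated objective: alternative
-- what changed: Replaces A's iterative accumulator loop (append to a growing out list) with structural recursion on the list: validate the head, then cons it onto the recursive result of the tail.
import Mathlib
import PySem

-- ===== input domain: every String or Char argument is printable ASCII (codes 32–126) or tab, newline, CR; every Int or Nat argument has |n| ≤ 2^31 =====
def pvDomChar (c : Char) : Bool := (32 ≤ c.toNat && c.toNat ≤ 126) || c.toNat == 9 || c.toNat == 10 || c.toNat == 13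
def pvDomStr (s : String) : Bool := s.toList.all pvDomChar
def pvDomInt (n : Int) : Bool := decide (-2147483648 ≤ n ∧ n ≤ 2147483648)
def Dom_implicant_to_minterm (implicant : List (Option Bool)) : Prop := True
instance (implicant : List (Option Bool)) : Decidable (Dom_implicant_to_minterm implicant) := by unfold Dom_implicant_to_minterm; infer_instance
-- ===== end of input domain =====

-- B replaces A's iterative accumulator loop with structural recursion (cons head onto the recursive tail result).

-- ===== PORT A =====
-- A's loop: append each value to out; on a None value A raises (excluded by Pre_; the
-- port returns the list built so far there, a value never claimed about).
def implicant_to_minterm_go (rest : List (Option Bool)) (out : List Bool) : List Bool :=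
  match rest with
  | [] => out
  | none :: _ => out          -- Python raises here; outside Pre_
  | some v :: rest' => implicant_to_minterm_go rest' (out ++ [v])

def implicant_to_minterm (implicant : List (Option Bool)) : List Bool :=
  implicant_to_minterm_go implicant []

-- ===== PORT B =====
-- B: recursion on the list; empty → []; None head → Python raises (outside Pre_; port
-- returns []); otherwise [head] + recurse on the tail.
def implicant_to_minterm_alt (implicant : List (Option Bool)) : List Bool :=
  match implicant with
  | [] => []
  | none :: _ => []           -- Python raises here; outside Pre_
  | some v :: rest => [v] ++ implicant_to_minterm_alt rest

-- ===== PRECONDITION & SPEC =====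
-- Pre_ excludes exactly the inputs containing None, on which both Pythons raise.
def Pre_implicant_to_minterm (implicant : List (Option Bool)) : Prop :=
  ¬ implicant.contains none
instance (implicant : List (Option Bool)) : Decidable (Pre_implicant_to_minterm implicant) := by unfold Pre_implicant_to_minterm; infer_instance

def pvWitness_implicant_to_minterm : List (Option Bool) := [some true, some false, some true]

def Spec_implicant_to_minterm (implicant : List (Option Bool)) (out : List Bool) : Prop := out = implicant_to_minterm_alt implicant
instance (implicant : List (Option Bool)) (out : List Bool) : Decidable (Spec_implicant_to_minterm implicant out) := by unfold Spec_implicant_to_minterm; infer_instance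

-- ===== CLAIM (what is proved, stated in full; the proofs are below) =====
def Claim_equal_implicant_to_minterm : Prop := ∀ (implicant : List (Option Bool)), Dom_implicant_to_minterm implicant → Pre_implicant_to_minterm implicant → Spec_implicant_to_minterm implicant (implicant_to_minterm implicant)

-- ===== LEMMAS AND PROOFS =====
theorem implicant_to_minterm_go_spec (rest : List (Option Bool)) (out : List Bool)
    (h : ¬ rest.contains none) :
    implicant_to_minterm_go rest out = out ++ implicant_to_minterm_alt rest := by
  induction rest generalizing out with
  | nil => simp [implicant_to_minterm_go, implicant_to_minterm_alt]
  | cons x rest' ih =>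
    cases x with
    | none => simp at h
    | some v =>
      simp only [List.contains_cons] at h
      simp [implicant_to_minterm_go, implicant_to_minterm_alt,
        ih _ (by simpa using h)]

-- ===== VERDICT (by name: the statement is the Claim_ definition above) =====
theorem implicant_to_minterm_spec : Claim_equal_implicant_to_minterm := by
  intro implicant _ hpre
  unfold Spec_implicant_to_minterm implicant_to_minterm
  rw [implicant_to_minterm_go_spec _ _ hpre, List.nil_append]
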